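-- pv_equiv track=rewrite | github.com/Erick-Bryan-Cubas/green-deck | app/services/question_parser.py | compute_answers_field
-- ===== SOURCE A (Python) =====
-- from typing import List, Dict, Any, Optional, Literal
--
-- def compute_answers_field(qtype: int, options: List[Dict[str, Any]]) -> str:
--     """
--     Calcula o campo Answers baseado no tipo de questão.
--
--     - kprim: "1100" (4 dígitos binários, 1=correto, 0=incorreto)
--     - mc: "123" (índices das corretas, base 1)
--     - sc: "2" (único índice correto, base 1)
--     """
--     if qtype == 0:
--         # kprim: exatamente 4 opções, formato binário
--         result = ""
--         for i in range(4):
--             if i < len(options) and options[i].get("isCorrect", False):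
--                 result += "1"
--             else:
--                 result += "0"
--         return result
--
--     elif qtype == 1:
--         # mc: índices das corretas (1-indexed)
--         correct_indices = []
--         for i, opt in enumerate(options):
--             if opt.get("isCorrect", False):
--                 correct_indices.append(str(i + 1))
--         return "".join(correct_indices) if correct_indices else "1"
--
--     else:
--         # sc: único índice correto (1-indexed)
--         for i, opt in enumerate(options):
--             if opt.get("isCorrect", False):
--                 return str(i + 1)
--         return "1"
-- ===== SOURCE B (Python) =====
-- def compute_answers_field(qtype, options):
--     # Single shared pass: 1-based indices of the correct options; each branch is pure formatting.
--     correct = [i + 1 for i, opt in enumerate(options) if opt.get("isCorrect", False)]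
--     if qtype == 0:
--         return "".join("1" if p in correct else "0" for p in range(1, 5))
--     if qtype == 1:
--         return "".join(map(str, correct)) if correct else "1"
--     return str(correct[0]) if correct else "1"
-- ===== Notes on version B (the rewrite author's own statement) =====
-- stated objective: simpler
-- what changed: B computes the list of 1-based correct indices in one shared pass and each qtype branch becomes pure formatting of that list (binary membership string for kprim, digit join for mc, head for sc), instead of A's three separate scans over the options.
import Mathlib
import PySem

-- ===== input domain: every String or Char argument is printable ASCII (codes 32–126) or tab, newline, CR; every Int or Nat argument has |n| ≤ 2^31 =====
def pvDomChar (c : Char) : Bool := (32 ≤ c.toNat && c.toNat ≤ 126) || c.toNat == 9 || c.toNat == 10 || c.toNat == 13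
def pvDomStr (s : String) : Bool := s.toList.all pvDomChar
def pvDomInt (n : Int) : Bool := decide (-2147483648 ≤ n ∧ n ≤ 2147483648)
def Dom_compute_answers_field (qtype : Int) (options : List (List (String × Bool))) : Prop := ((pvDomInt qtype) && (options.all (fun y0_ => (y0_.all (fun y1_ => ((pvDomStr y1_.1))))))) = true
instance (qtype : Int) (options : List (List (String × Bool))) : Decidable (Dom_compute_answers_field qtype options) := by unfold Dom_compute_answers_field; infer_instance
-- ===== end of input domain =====

-- B changes the decomposition: one shared pass collects the 1-based correct indices, each branch only formats that list (objective: simpler).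

-- ===== PORT A =====
-- opt.get("isCorrect", False): first-match association-list lookup with default
def pvIsCorrect (opt : List (String × Bool)) : Bool :=
  PySem.Dict.getD (PySem.Dict.mk opt) "isCorrect" false

-- the sc loop with early return, as structural recursion over enumerate(options)
def pvScLoop : List (Int × List (String × Bool)) → String
  | [] => "1"
  | p :: rest => if pvIsCorrect p.2 then PySem.Int.toStr (p.1 + 1) else pvScLoop rest

def compute_answers_field (qtype : Int) (options : List (List (String × Bool))) : String :=
  if qtype = 0 then
    -- kprim: for i in range(4): result += "1"/"0"  ('and' ported as nested if, short-circuit)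
    (PySem.List.pyRange 0 4 1).foldl
      (fun result i =>
        if i < (options.length : Int) then
          (if pvIsCorrect (PySem.List.pyGetD options i []) then result ++ "1" else result ++ "0")
        else result ++ "0") ""
  else if qtype = 1 then
    -- mc: accumulate str(i+1) for the correct ones, join, default "1"
    let correct_indices :=
      (PySem.List.enumerate options).foldl
        (fun acc p => if pvIsCorrect p.2 then acc ++ [PySem.Int.toStr (p.1 + 1)] else acc) []
    if correct_indices ≠ [] then PySem.Str.join "" correct_indices else "1"
  else
    pvScLoop (PySem.List.enumerate options)

-- ===== PORT B =====
-- correct = [i+1 for i, opt in enumerate(options) if opt.get("isCorrect", False)]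
def pvCorrect (options : List (List (String × Bool))) : List Int :=
  (PySem.List.enumerate options).filterMap
    (fun p => if pvIsCorrect p.2 then some (p.1 + 1) else none)

def compute_answers_field_alt (qtype : Int) (options : List (List (String × Bool))) : String :=
  let correct := pvCorrect options
  if qtype = 0 then
    PySem.Str.join "" ((PySem.List.pyRange 1 5 1).map (fun p => if p ∈ correct then "1" else "0"))
  else if qtype = 1 then
    if correct ≠ [] then PySem.Str.join "" (correct.map PySem.Int.toStr) else "1"
  else
    match correct with
    | c :: _ => PySem.Int.toStr c
    | [] => "1"

-- ===== PRECONDITION & SPEC =====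
def Spec_compute_answers_field (qtype : Int) (options : List (List (String × Bool))) (out : String) : Prop := out = compute_answers_field_alt qtype options
instance (qtype : Int) (options : List (List (String × Bool))) (out : String) : Decidable (Spec_compute_answers_field qtype options out) := by unfold Spec_compute_answers_field; infer_instance

-- ===== CLAIM (what is proved, stated in full; the proofs are below) =====
def Claim_equal_compute_answers_field : Prop := ∀ (qtype : Int) (options : List (List (String × Bool))), Dom_compute_answers_field qtype options → Spec_compute_answers_field qtype options (compute_answers_field qtype options)

-- ===== LEMMAS AND PROOFS =====

lemma mem_pvCorrect (options : List (List (String × Bool))) (k : Nat) :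
    ((k : Int) + 1) ∈ pvCorrect options ↔ ∃ h : k < options.length, pvIsCorrect options[k] = true := by
  unfold pvCorrect
  simp only [List.mem_filterMap, PySem.List.mem_enumerate_iff]
  constructor
  · rintro ⟨p, ⟨j, hj, rfl⟩, hif⟩
    simp only [zero_add] at hif
    by_cases hc : pvIsCorrect options[j] = true
    · simp [hc] at hif
      have : j = k := by omega
      subst this; exact ⟨hj, hc⟩
    · simp [hc] at hif
  · rintro ⟨hk, hc⟩
    exact ⟨((k : Int), options[k]), ⟨k, hk, by simp⟩, by simp [hc]⟩

-- one kprim cell: A's guarded lookup equals B's membership test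
lemma pvCell (options : List (List (String × Bool))) (k : Nat) :
    (if (k : Int) < (options.length : Int) then
      (if pvIsCorrect (PySem.List.pyGetD options (k : Int) []) then "1" else "0")
     else ("0" : String))
    = (if ((k : Int) + 1) ∈ pvCorrect options then "1" else "0") := by
  by_cases hk : k < options.length
  · rw [if_pos (by exact_mod_cast hk), PySem.List.pyGetD_natCast, List.getD_eq_getElem _ _ hk]
    by_cases hc : pvIsCorrect options[k] = true
    · rw [if_pos hc, if_pos ((mem_pvCorrect options k).mpr ⟨hk, hc⟩)]
    · rw [if_neg hc, if_neg (fun hm => hc ((mem_pvCorrect options k).mp hm).2)]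
  · rw [if_neg (by exact_mod_cast hk),
        if_neg (fun hm => hk ((mem_pvCorrect options k).mp hm).1)]

lemma pvPull (c : Prop) [Decidable c] (d : Prop) [Decidable d] (r : String) :
    (if c then (if d then r ++ "1" else r ++ "0") else r ++ "0")
    = r ++ (if c then (if d then "1" else "0") else "0") := by
  split
  · split <;> rfl
  · rfl

lemma pvMc (l : List (Int × List (String × Bool))) :
    l.filterMap (fun p => if pvIsCorrect p.2 then some (p.1 + 1) else none)
    = (l.filter (fun p => pvIsCorrect p.2)).map (fun p => p.1 + 1) := by
  induction l with
  | nil => rfl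
  | cons x xs ih =>
    by_cases hc : pvIsCorrect x.2 = true <;>
      simp [hc, ih]

lemma pvSc (l : List (Int × List (String × Bool))) :
    pvScLoop l = (match l.filterMap (fun p => if pvIsCorrect p.2 then some (p.1 + 1) else none) with
      | c :: _ => PySem.Int.toStr c
      | [] => "1") := by
  induction l with
  | nil => rfl
  | cons x xs ih =>
    by_cases hc : pvIsCorrect x.2 = true <;>
      simp [pvScLoop, hc, ih]

-- ===== VERDICT (by name: the statement is the Claim_ definition above) =====
theorem compute_answers_field_spec : Claim_equal_compute_answers_field := by
  intro qtype options _
  unfold Spec_compute_answers_field compute_answers_field compute_answers_field_alt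
  by_cases h0 : qtype = 0
  · simp only [h0, if_pos]
    rw [show PySem.List.pyRange 0 4 1 = [(0:Int),1,2,3] from by decide,
        show PySem.List.pyRange 1 5 1 = [(1:Int),2,3,4] from by decide]
    simp only [List.foldl, List.map, pvPull]
    have c0 := pvCell options 0; have c1 := pvCell options 1
    have c2 := pvCell options 2; have c3 := pvCell options 3
    push_cast at c0 c1 c2 c3
    rw [c0, c1, c2, c3]
    by_cases m1 : (1:Int) ∈ pvCorrect options <;>
      by_cases m2 : (2:Int) ∈ pvCorrect options <;>
        by_cases m3 : (3:Int) ∈ pvCorrect options <;>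
          by_cases m4 : (4:Int) ∈ pvCorrect options <;>
            simp [m1, m2, m3, m4] <;> decide
  · by_cases h1 : qtype = 1
    · subst h1
      simp only [if_neg (show ¬(1:Int) = 0 by norm_num)]
      rw [PySem.List.foldl_append_if (fun p => pvIsCorrect p.2)
            (fun p => PySem.Int.toStr (p.1 + 1)) (PySem.List.enumerate options) []]
      simp only [List.nil_append, pvCorrect, pvMc]
      by_cases he : (PySem.List.enumerate options).filter (fun p => pvIsCorrect p.2) = [] <;>
        simp [he, List.map_map, Function.comp_def]
    · simp only [if_neg h0, if_neg h1]
      rw [pvSc]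
      rfl
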